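-- pv_equiv track=rewrite | github.com/lfuegner/Bachelorarbeit | sequence_/seat.py | generateSeat
-- ===== SOURCE A (Python) =====
-- import math
--
-- def generateSeat(total_seats: int, alt ,alt_letter) -> list:
--   seats_per_row = 6
--   first_row_seats = 3
--   Sequence: list = []
--   alternate = alt + 1
--
--   SeatList = [1,2,3,4,5,0]
--
--   if alt_letter == False:
--     for letter_index in range(seats_per_row):
--       for seat in range(total_seats,0,-1):
--         if SeatList[letter_index] == (seat + first_row_seats )% seats_per_row :
--           Sequence.append(seat)
--
--   elif alt_letter == True:
--     total_rows = math.ceil((total_seats + 3) / 6)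
--
--     for k in range(alternate):
--       direction = 1
--       start_row = 1
--       end_row = 4
--
--       for j in range(2):
--         for letter in range(start_row,end_row,direction):
--           for row in range(total_rows,0,-alternate):
--             if j == 0:
--               seat = (row*seats_per_row) - first_row_seats + letter - seats_per_row
--
--               if seat > 0 and seat <= total_seats:
--                 Sequence.append(seat)
--
--               letter = 7 - letter # alternate beteen letters
--
--             elif j == 1:
--               seat = (row*seats_per_row) - first_row_seats + letter - seats_per_row
--
--               if  seat > 0 and seat <= total_seats:
--                 Sequence.append(seat)
--
--               letter = 7 - letter # alternate beteen letters
--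
--         direction = -1
--         start_row = 6
--         end_row = 3
--       total_rows -= 1
--
--   return Sequence
-- ===== SOURCE B (Python) =====
-- import math
--
-- def generateSeat(total_seats: int, alt, alt_letter) -> list:
--     if alt_letter == False:
--         # one descending pass into six residue buckets, then concatenate in code order
--         buckets = [[] for _ in range(6)]
--         for seat in range(total_seats, 0, -1):
--             buckets[(seat + 3) % 6].append(seat)
--         seq = []
--         for code in [1, 2, 3, 4, 5, 0]:
--             seq.extend(buckets[code])
--         return seq
--     else:
--         # A's two identical j-branches are collapsed into one letter list, and the
--         # per-row letter toggling is computed from the row index parity instead of mutation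
--         seq = []
--         total_rows = math.ceil((total_seats + 3) / 6)
--         for k in range(alt + 1):
--             for letter in (1, 2, 3, 6, 5, 4):
--                 for i, row in enumerate(range(total_rows, 0, -(alt + 1))):
--                     l = letter if i % 2 == 0 else 7 - letter
--                     seat = row * 6 + l - 9
--                     if 0 < seat <= total_seats:
--                         seq.append(seat)
--             total_rows -= 1
--         return seq
-- ===== Notes on version B (the rewrite author's own statement) =====
-- stated objective: simpler
-- what changed: The alt_letter==False branch makes one descending pass that buckets seats by (seat+3)%6 and concatenates the buckets instead of six full scans, and the alt_letter==True branch collapses A's two identical j-branches into one flattened letter list and replaces the in-loop 'letter = 7 - letter' mutation by an index-parity formula.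
import Mathlib
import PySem

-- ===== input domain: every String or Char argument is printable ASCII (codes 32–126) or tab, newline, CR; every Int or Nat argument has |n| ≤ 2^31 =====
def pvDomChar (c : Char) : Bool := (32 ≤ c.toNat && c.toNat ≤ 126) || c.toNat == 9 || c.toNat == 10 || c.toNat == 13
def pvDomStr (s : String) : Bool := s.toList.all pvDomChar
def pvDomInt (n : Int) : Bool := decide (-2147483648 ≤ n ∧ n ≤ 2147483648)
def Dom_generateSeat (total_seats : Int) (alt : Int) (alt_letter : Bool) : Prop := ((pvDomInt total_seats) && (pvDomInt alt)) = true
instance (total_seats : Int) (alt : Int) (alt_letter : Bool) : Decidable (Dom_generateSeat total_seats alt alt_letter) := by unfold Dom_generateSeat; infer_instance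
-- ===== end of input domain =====

-- B collapses A's duplicated j-branches into one flattened letter list with an index-parity
-- letter formula, and replaces the six full scans of the False branch by one bucketing pass (objective: simpler).

-- ===== PORT A =====
-- literal transliteration of A; 'letter' is reassigned inside the row loop ('letter = 7 - letter'),
-- so it is loop-carried state of the row fold. math.ceil((total_seats+3)/6) is ported as the exact
-- integer ceiling -((-(total_seats+3)) // 6), which equals the float computation for |total_seats| ≤ 2^31.
def generateSeat (total_seats : Int) (alt : Int) (alt_letter : Bool) : List Int :=
  let seats_per_row : Int := 6
  let first_row_seats : Int := 3
  let Sequence : List Int := []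
  let alternate : Int := alt + 1
  let SeatList : List Int := [1, 2, 3, 4, 5, 0]
  if alt_letter = false then
    (PySem.List.pyRange 0 seats_per_row 1).foldl (fun seq letter_index =>
      (PySem.List.pyRange total_seats 0 (-1)).foldl (fun seq seat =>
        if PySem.List.pyGetD SeatList letter_index 0 == PySem.Int.mod (seat + first_row_seats) seats_per_row
        then seq ++ [seat] else seq) seq) Sequence
  else if alt_letter = true then
    let total_rows : Int := -(PySem.Int.floordiv (-(total_seats + 3)) 6)
    let res := (PySem.List.pyRange 0 alternate 1).foldl (fun (acc : List Int × Int) _k =>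
      let st := (PySem.List.pyRange 0 2 1).foldl (fun (st : List Int × Int × Int × Int) j =>
        let direction := st.2.1
        let start_row := st.2.2.1
        let end_row := st.2.2.2
        let sq := (PySem.List.pyRange start_row end_row direction).foldl (fun sq letter0 =>
          ((PySem.List.pyRange acc.2 0 (-alternate)).foldl (fun (q : List Int × Int) row =>
            if j == 0 then
              let seat := row * seats_per_row - first_row_seats + q.2 - seats_per_row
              ((if seat > 0 ∧ seat ≤ total_seats then q.1 ++ [seat] else q.1), 7 - q.2)
            else if j == 1 then
              let seat := row * seats_per_row - first_row_seats + q.2 - seats_per_row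
              ((if seat > 0 ∧ seat ≤ total_seats then q.1 ++ [seat] else q.1), 7 - q.2)
            else q) (sq, letter0)).1) st.1
        (sq, -1, 6, 3)) (acc.1, 1, 1, 4)
      (st.1, acc.2 - 1)) (Sequence, total_rows)
    res.1
  else Sequence

-- ===== PORT B =====
def generateSeat_alt (total_seats : Int) (alt : Int) (alt_letter : Bool) : List Int :=
  if alt_letter = false then
    let buckets : List (List Int) := [[], [], [], [], [], []]
    let buckets := (PySem.List.pyRange total_seats 0 (-1)).foldl (fun bs seat =>
      bs.set (PySem.Int.mod (seat + 3) 6).toNat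
        (PySem.List.pyGetD bs (PySem.Int.mod (seat + 3) 6) [] ++ [seat])) buckets
    [(1 : Int), 2, 3, 4, 5, 0].foldl (fun seq code => seq ++ PySem.List.pyGetD buckets code []) []
  else
    let total_rows : Int := -(PySem.Int.floordiv (-(total_seats + 3)) 6)
    let res := (PySem.List.pyRange 0 (alt + 1) 1).foldl (fun (acc : List Int × Int) _k =>
      let seq := [(1 : Int), 2, 3, 6, 5, 4].foldl (fun seq letter =>
        (PySem.List.enumerate (PySem.List.pyRange acc.2 0 (-(alt + 1))) 0).foldl (fun seq ir =>
          let l := if PySem.Int.mod ir.1 2 == 0 then letter else 7 - letter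
          let seat := ir.2 * 6 + l - 9
          if 0 < seat ∧ seat ≤ total_seats then seq ++ [seat] else seq) seq) acc.1
      (seq, acc.2 - 1)) ([], total_rows)
    res.1

-- ===== PRECONDITION & SPEC =====
def Spec_generateSeat (total_seats : Int) (alt : Int) (alt_letter : Bool) (out : List Int) : Prop := out = generateSeat_alt total_seats alt alt_letter
instance (total_seats : Int) (alt : Int) (alt_letter : Bool) (out : List Int) : Decidable (Spec_generateSeat total_seats alt alt_letter out) := by unfold Spec_generateSeat; infer_instance

-- ===== CLAIM (what is proved, stated in full; the proofs are below) =====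
def Claim_equal_generateSeat : Prop := ∀ (total_seats : Int) (alt : Int) (alt_letter : Bool), Dom_generateSeat total_seats alt alt_letter → Spec_generateSeat total_seats alt alt_letter (generateSeat total_seats alt alt_letter)

-- ===== LEMMAS AND PROOFS =====

-- bucket invariant for B's False branch: after the descending pass, bucket c holds
-- exactly the scanned seats with (seat+3) % 6 = c, in scan order
theorem pvBucket (L : List Int) (bs : List (List Int)) (hlen : bs.length = 6)
    (c : Int) (h0 : 0 ≤ c) (hc : c < 6) :
    PySem.List.pyGetD (L.foldl (fun bs seat =>
        bs.set (PySem.Int.mod (seat + 3) 6).toNat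
          (PySem.List.pyGetD bs (PySem.Int.mod (seat + 3) 6) [] ++ [seat])) bs) c []
      = PySem.List.pyGetD bs c [] ++ L.filter (fun s => c == PySem.Int.mod (s + 3) 6) := by
  induction L generalizing bs with
  | nil => simp
  | cons s L ih =>
    have hm : PySem.Int.mod (s + 3) 6 = (s + 3) % 6 := PySem.Int.mod_eq_emod_of_pos (by norm_num)
    have hi0 : 0 ≤ PySem.Int.mod (s + 3) 6 := by rw [hm]; omega
    have hi6 : PySem.Int.mod (s + 3) 6 < 6 := by rw [hm]; omega
    simp only [List.foldl_cons, List.filter_cons]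
    rw [ih _ (by simp [hlen])]
    rw [PySem.List.pyGetD_of_nonneg _ _ h0, PySem.List.pyGetD_of_nonneg _ _ h0,
        PySem.List.pyGetD_of_nonneg _ _ hi0]
    by_cases he : PySem.Int.mod (s + 3) 6 = c
    · have hb : (c == PySem.Int.mod (s + 3) 6) = true := by rw [he]; exact beq_self_eq_true c
      rw [hb]
      have : (bs.set (PySem.Int.mod (s + 3) 6).toNat
          (bs.getD (PySem.Int.mod (s + 3) 6).toNat [] ++ [s])).getD c.toNat []
          = bs.getD c.toNat [] ++ [s] := by
        have hct : (PySem.Int.mod (s + 3) 6).toNat = c.toNat := by rw [he]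
        rw [hct, List.getD_eq_getElem?_getD, List.getElem?_set_self (by omega),
            List.getD_eq_getElem?_getD]
        cases h : bs[c.toNat]? with
        | none => exact absurd (List.getElem?_eq_none_iff.mp h) (by omega)
        | some v => simp
      rw [this, List.append_assoc]
      simp
    · have hb : (c == PySem.Int.mod (s + 3) 6) = false := by
        rw [beq_eq_false_iff_ne]; exact Ne.symm he
      rw [hb]
      have : (bs.set (PySem.Int.mod (s + 3) 6).toNat
          (bs.getD (PySem.Int.mod (s + 3) 6).toNat [] ++ [s])).getD c.toNat []
          = bs.getD c.toNat [] := by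
        rw [List.getD_eq_getElem?_getD,
            List.getElem?_set_ne (by omega : (PySem.Int.mod (s + 3) 6).toNat ≠ c.toNat),
            ← List.getD_eq_getElem?_getD]
      rw [this]
      simp

-- A's per-row letter toggling ('letter = 7 - letter') equals B's index-parity formula
theorem pvToggle (n : Int) (rows : List Int) (s : Int) (sq : List Int) (l : Int) :
    (rows.foldl (fun (q : List Int × Int) row =>
        ((if row * 6 - 3 + q.2 - 6 > 0 ∧ row * 6 - 3 + q.2 - 6 ≤ n
          then q.1 ++ [row * 6 - 3 + q.2 - 6] else q.1), 7 - q.2)) (sq, l)).1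
    = (PySem.List.enumerate rows s).foldl (fun sq2 ir =>
        if 0 < ir.2 * 6 + (if PySem.Int.mod (ir.1 - s) 2 == 0 then l else 7 - l) - 9 ∧
           ir.2 * 6 + (if PySem.Int.mod (ir.1 - s) 2 == 0 then l else 7 - l) - 9 ≤ n
        then sq2 ++ [ir.2 * 6 + (if PySem.Int.mod (ir.1 - s) 2 == 0 then l else 7 - l) - 9]
        else sq2) sq := by
  induction rows generalizing s sq l with
  | nil => simp [PySem.List.enumerate]
  | cons r rs ih =>
    have hcons : PySem.List.enumerate (r :: rs) s = (s, r) :: PySem.List.enumerate rs (s + 1) := by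
      simp [PySem.List.enumerate]
    rw [hcons]
    simp only [List.foldl_cons]
    rw [ih (s + 1)]
    have hmod0 : (PySem.Int.mod (s - s) 2 == 0) = true := by
      simp [PySem.Int.mod]
    rw [hmod0]
    simp only [if_true]
    have hseat : r * 6 - 3 + l - 6 = r * 6 + l - 9 := by ring
    rw [hseat]
    have hgt : ∀ x : Int, (x > 0) = (0 < x) := fun _ => rfl
    rw [show ((if 0 < r * 6 + l - 9 ∧ r * 6 + l - 9 ≤ n then sq ++ [r * 6 + l - 9] else sq)) =
        ((if r * 6 + l - 9 > 0 ∧ r * 6 + l - 9 ≤ n then sq ++ [r * 6 + l - 9] else sq)) from rfl]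
    refine PySem.List.foldl_congr_mem _ _ _ _ ?_
    intro acc ir _
    have h2 : (0:Int) < 2 := by norm_num
    have hiff : (if PySem.Int.mod (ir.1 - (s + 1)) 2 == 0 then 7 - l else 7 - (7 - l))
        = (if PySem.Int.mod (ir.1 - s) 2 == 0 then l else 7 - l) := by
      rw [PySem.Int.mod_eq_emod_of_pos h2, PySem.Int.mod_eq_emod_of_pos h2]
      simp only [beq_iff_eq]
      split_ifs <;> omega
    rw [hiff]

-- pvToggle specialised to start index 0 and stated in simp-normal form, as used by the main proof
theorem pvToggle0 (n : Int) (rows : List Int) (sq : List Int) (l : Int) :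
    (rows.foldl (fun (q : List Int × Int) row =>
        ((if 6 < row * 6 - 3 + q.2 ∧ row * 6 - 3 + q.2 ≤ n + 6
          then q.1 ++ [row * 6 - 3 + q.2 - 6] else q.1), 7 - q.2)) (sq, l)).1
    = (PySem.List.enumerate rows 0).foldl (fun sq2 ir =>
        if (9 < ir.2 * 6 + if 2 ∣ ir.1 then l else 7 - l) ∧
           (ir.2 * 6 + if 2 ∣ ir.1 then l else 7 - l) ≤ n + 9
        then sq2 ++ [(ir.2 * 6 + if 2 ∣ ir.1 then l else 7 - l) - 9]
        else sq2) sq := by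
  have h := pvToggle n rows 0 sq l
  simpa using h

-- ===== VERDICT (by name: the statement is the Claim_ definition above) =====
theorem generateSeat_spec : Claim_equal_generateSeat := by
  intro n alt al _hdom
  unfold Spec_generateSeat
  cases al with
  | false =>
    simp only [generateSeat, generateSeat_alt]
    rw [show PySem.List.pyRange 0 6 1 = [0, 1, 2, 3, 4, 5] from by decide]
    simp only [List.foldl_cons, List.foldl_nil]
    rw [show PySem.List.pyGetD [(1 : Int), 2, 3, 4, 5, 0] 0 0 = 1 from by decide,
        show PySem.List.pyGetD [(1 : Int), 2, 3, 4, 5, 0] 1 0 = 2 from by decide,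
        show PySem.List.pyGetD [(1 : Int), 2, 3, 4, 5, 0] 2 0 = 3 from by decide,
        show PySem.List.pyGetD [(1 : Int), 2, 3, 4, 5, 0] 3 0 = 4 from by decide,
        show PySem.List.pyGetD [(1 : Int), 2, 3, 4, 5, 0] 4 0 = 5 from by decide,
        show PySem.List.pyGetD [(1 : Int), 2, 3, 4, 5, 0] 5 0 = 0 from by decide]
    simp only [PySem.List.foldl_append_if_eq_filter]
    rw [pvBucket _ _ (by decide) 1 (by norm_num) (by norm_num),
        pvBucket _ _ (by decide) 2 (by norm_num) (by norm_num),
        pvBucket _ _ (by decide) 3 (by norm_num) (by norm_num),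
        pvBucket _ _ (by decide) 4 (by norm_num) (by norm_num),
        pvBucket _ _ (by decide) 5 (by norm_num) (by norm_num),
        pvBucket _ _ (by decide) 0 (by norm_num) (by norm_num)]
    rw [show PySem.List.pyGetD ([[], [], [], [], [], []] : List (List Int)) 1 [] = [] from by decide,
        show PySem.List.pyGetD ([[], [], [], [], [], []] : List (List Int)) 2 [] = [] from by decide,
        show PySem.List.pyGetD ([[], [], [], [], [], []] : List (List Int)) 3 [] = [] from by decide,
        show PySem.List.pyGetD ([[], [], [], [], [], []] : List (List Int)) 4 [] = [] from by decide,
        show PySem.List.pyGetD ([[], [], [], [], [], []] : List (List Int)) 5 [] = [] from by decide,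
        show PySem.List.pyGetD ([[], [], [], [], [], []] : List (List Int)) 0 [] = [] from by decide]
    simp
  | true =>
    simp only [generateSeat, generateSeat_alt]
    refine congrArg Prod.fst (PySem.List.foldl_congr_mem _ _ _ _ ?_)
    intro acc k _
    conv_lhs => simp [show PySem.List.pyRange 0 2 1 = [0, 1] from by decide,
        show PySem.List.pyRange 1 4 1 = [1, 2, 3] from by decide,
        show PySem.List.pyRange 6 3 (-1) = [6, 5, 4] from by decide]
    conv_rhs => simp
    simp only [pvToggle0]
    norm_num
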